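-- pv_equiv track=rewrite | github.com/C0jae/Coding-Pratice | src/Programmers/P31피로도.py | check
-- ===== SOURCE A (Python) =====
-- def check(k, dungeons):
--     cnt = 0
--
--     for dungeon in dungeons:
--         a, b = dungeon
--
--         # 최소 피로도보다 적으면 return
--         if k < a: return cnt
--
--         k -= b      # 소모피로도
--         cnt += 1    # 던전 탐사갯수 +1
--
--     return cnt
-- ===== SOURCE B (Python) =====
-- def check(k, dungeons):
--     # Prefix-sum table of consumed fatigue: prefix[i] = sum of b's of first i dungeons.
--     prefix = [0]
--     for _, b in dungeons:
--         prefix.append(prefix[-1] + b)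
--     n = len(dungeons)
--     for i, (a, _) in enumerate(dungeons):
--         if k - prefix[i] < a:
--             return i
--     return n
-- ===== Notes on version B (the rewrite author's own statement) =====
-- stated objective: alternative
-- what changed: Replaces the running fatigue-subtraction accumulator with a precomputed prefix-sum table of consumed fatigue, then returns the first index i with k - prefix[i] < a (or len(dungeons)).
import Mathlib
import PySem

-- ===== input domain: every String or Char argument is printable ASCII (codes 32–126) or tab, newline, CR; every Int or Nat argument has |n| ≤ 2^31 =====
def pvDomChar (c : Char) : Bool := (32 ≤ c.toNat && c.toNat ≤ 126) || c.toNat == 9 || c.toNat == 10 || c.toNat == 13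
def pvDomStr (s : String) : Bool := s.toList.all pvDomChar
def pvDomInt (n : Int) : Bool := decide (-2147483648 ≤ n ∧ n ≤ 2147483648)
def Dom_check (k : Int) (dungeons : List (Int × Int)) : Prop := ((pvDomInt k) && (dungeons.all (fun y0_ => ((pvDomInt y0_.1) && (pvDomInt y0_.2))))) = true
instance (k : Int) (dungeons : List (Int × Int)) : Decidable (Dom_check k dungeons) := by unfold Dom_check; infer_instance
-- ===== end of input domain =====

-- B replaces A's running fatigue accumulator with a precomputed prefix-sum table consulted by index (alternative decomposition, same cost).


-- ===== PORT A =====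
-- A's loop: running fatigue k, counter cnt, early return on k < a.
def checkGo (k : Int) (cnt : Int) : List (Int × Int) → Int
  | [] => cnt
  | (a, b) :: rest => if k < a then cnt else checkGo (k - b) (cnt + 1) rest

def check (k : Int) (dungeons : List (Int × Int)) : Int := checkGo k 0 dungeons

-- ===== PORT B =====
-- prefix = [0]; for _, b in dungeons: prefix.append(prefix[-1] + b)
-- (s carries prefix[-1], the running last element of the table being built)
def buildPrefix (s : Int) : List (Int × Int) → List Int
  | [] => [s]
  | (_, b) :: rest => s :: buildPrefix (s + b) rest

-- for i, (a, _) in enumerate(dungeons): if k - prefix[i] < a: return i; / return n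
def scanFail (k : Int) (pref : List Int) (n : Int) : Nat → List (Int × Int) → Int
  | _, [] => n
  | i, (a, _) :: rest =>
      if k - pref.getD i 0 < a then (i : Int) else scanFail k pref n (i + 1) rest

def check_alt (k : Int) (dungeons : List (Int × Int)) : Int :=
  scanFail k (buildPrefix 0 dungeons) (dungeons.length : Int) 0 dungeons

-- ===== PRECONDITION & SPEC =====
def Spec_check (k : Int) (dungeons : List (Int × Int)) (out : Int) : Prop := out = check_alt k dungeons
instance (k : Int) (dungeons : List (Int × Int)) (out : Int) : Decidable (Spec_check k dungeons out) := by unfold Spec_check; infer_instance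

-- ===== CLAIM (what is proved, stated in full; the proofs are below) =====
def Claim_equal_check : Prop := ∀ (k : Int) (dungeons : List (Int × Int)), Dom_check k dungeons → Spec_check k dungeons (check k dungeons)

-- ===== LEMMAS AND PROOFS =====
theorem getD_append_self (front : List Int) (x : Int) (t : List Int) :
    (front ++ x :: t).getD front.length 0 = x := by
  simp [List.getD]

theorem scanFail_eq_checkGo (l : List (Int × Int)) (front : List Int) (s k : Int) :
    scanFail k (front ++ buildPrefix s l) ((front.length : Int) + l.length) front.length l
      = checkGo (k - s) (front.length : Int) l := by
  induction l generalizing front s k with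
  | nil => simp [scanFail, checkGo]
  | cons hd tl ih =>
      obtain ⟨a, b⟩ := hd
      simp only [scanFail, checkGo, buildPrefix, getD_append_self]
      by_cases h : k - s < a
      · simp [h]
      · simp only [h, if_false]
        have h2 := ih (front ++ [s]) (s + b) k
        simp only [List.append_assoc, List.cons_append, List.nil_append,
          List.length_append, List.length_cons, List.length_nil] at h2 ⊢
        have e1 : k - (s + b) = k - s - b := by ring
        rw [e1] at h2
        convert h2 using 2 <;> push_cast <;> omega

-- ===== VERDICT (by name: the statement is the Claim_ definition above) =====
theorem check_spec : Claim_equal_check := by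
  intro k dungeons _
  unfold Spec_check check check_alt
  have h := scanFail_eq_checkGo dungeons [] 0 k
  simp only [List.nil_append, List.length_nil, Int.natCast_zero, zero_add, sub_zero] at h
  exact h.symm
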